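-- pv_equiv track=rewrite | github.com/elitsuri/EX2EliyhoTsuri-MachineLearning | ex2.py | num_of_difference
-- ===== SOURCE A (Python) =====
-- def num_of_difference(matrix,flag):
--      index, qrtr1, qrtr2, qrtr3, qrtr4 = 0, 0, 0, 0, 0
--      mid = len(matrix[0]) // 2
--      my_list = [0 for i in matrix]
--      if flag is False:
--           for i in matrix:
--                qrtr1, qrtr2, qrtr3, qrtr4 = 0, 0, 0, 0
--                for row in range(0, mid):
--                     for col in range(0, mid):
--                          qrtr1 += i[row][col]
--                for row in range(0, mid):
--                     for col in range(mid, len(matrix[0])):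
--                          qrtr2 += i[row][col]
--                for row in range(mid, len(matrix[0])):
--                     for col in range(0, mid):
--                          qrtr3 += i[row][col]
--                for row in range(mid, len(matrix[0])):
--                     for col in range(mid, len(matrix[0])):
--                          qrtr2 += i[row][col]
--                my_list[index] = abs((qrtr1 + qrtr3) -  (qrtr2 + qrtr4))
--                index += 1
--           i = 10
--      else:
--           for i in matrix:
--                for j in i:
--                     my_list[index] += j[1] + j[-2]
--                index += 1
--      return my_list
-- ===== SOURCE B (Python) =====
-- def num_of_difference(matrix, flag):
--     n = len(matrix[0])
--     if flag is False:
--         mid = n // 2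
--         out = []
--         for m in matrix:
--             d = 0
--             for row in m[:n]:
--                 d += sum(row[:mid]) - sum(row[mid:n])
--             out.append(abs(d))
--         return out
--     return [sum(r[1] for r in m) + sum(r[-2] for r in m) for m in matrix]
-- ===== Notes on version B (the rewrite author's own statement) =====
-- stated objective: simpler
-- what changed: Instead of A's four quadrant triple-loops over index ranges with separate accumulators, B slices each submatrix (m[:n], row[:mid], row[mid:n]) and folds a single per-row signed contribution sum(left)-sum(right) into one running difference, taking abs once per submatrix; the flag=True branch becomes two column sums (all row[1] plus all row[-2]) instead of one per-row accumulation.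
import Mathlib
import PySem

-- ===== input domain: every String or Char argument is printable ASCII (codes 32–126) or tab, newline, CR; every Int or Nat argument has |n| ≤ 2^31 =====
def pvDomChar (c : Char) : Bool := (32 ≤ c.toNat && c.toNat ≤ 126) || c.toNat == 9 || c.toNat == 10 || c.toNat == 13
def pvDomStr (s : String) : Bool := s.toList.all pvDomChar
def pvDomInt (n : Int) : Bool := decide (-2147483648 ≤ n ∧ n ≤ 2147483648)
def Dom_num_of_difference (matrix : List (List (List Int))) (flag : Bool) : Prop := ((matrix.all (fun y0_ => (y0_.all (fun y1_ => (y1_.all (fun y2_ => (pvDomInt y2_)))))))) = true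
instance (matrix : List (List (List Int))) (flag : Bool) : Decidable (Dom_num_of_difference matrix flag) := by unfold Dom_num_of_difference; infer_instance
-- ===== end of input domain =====

-- B replaces A's four quadrant index-range triple-loops by per-submatrix slicing: one fold over
-- m[:n] accumulating sum(row[:mid]) - sum(row[mid:n]) per row, abs once at the end; and the
-- flag=True branch by two column sums — objective: simpler; same exact integer results.

-- indexing helper for A's port: i[row][col] for the nonnegative range indices A uses
-- (exact under Pre_, which puts every accessed index in range)
def pvCell (m : List (List Int)) (r c : Nat) : Int := (m.getD r []).getD c 0

-- range(mid, n) as a list of Nat (Python's range with nonnegative bounds)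
def pvHi (mid n : Nat) : List Nat := (List.range (n - mid)).map (fun k => mid + k)

-- ===== PORT A =====
def num_of_difference (matrix : List (List (List Int))) (flag : Bool) : List Int :=
  let n := (matrix.getD 0 []).length          -- len(matrix[0]); Pre_ requires matrix ≠ []
  let mid := n / 2
  if flag = false then
    matrix.map (fun i =>
      let qrtr1 := (List.range mid).foldl (fun a r => (List.range mid).foldl (fun a c => a + pvCell i r c) a) 0
      let qrtr2 := (List.range mid).foldl (fun a r => (pvHi mid n).foldl (fun a c => a + pvCell i r c) a) 0
      let qrtr3 := (pvHi mid n).foldl (fun a r => (List.range mid).foldl (fun a c => a + pvCell i r c) a) 0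
      let qrtr2' := (pvHi mid n).foldl (fun a r => (pvHi mid n).foldl (fun a c => a + pvCell i r c) a) qrtr2
      let qrtr4 : Int := 0
      |(qrtr1 + qrtr3) - (qrtr2' + qrtr4)|)
  else
    matrix.map (fun i =>
      i.foldl (fun a j => a + (j.getD 1 0 + PySem.List.pyGetD j (-2) 0)) 0)

-- ===== PORT B =====
def num_of_difference_alt (matrix : List (List (List Int))) (flag : Bool) : List Int :=
  let n := (matrix.getD 0 []).length
  if flag = false then
    let mid := n / 2
    matrix.map (fun m =>
      |(PySem.List.slice m (some 0) (some (n : Int))).foldl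
          (fun d row => d + ((PySem.List.slice row (some 0) (some (mid : Int))).sum
                             - (PySem.List.slice row (some (mid : Int)) (some (n : Int))).sum)) 0|)
  else
    -- r[1] is r.getD 1 0 (exact under Pre_: every row has length ≥ 2)
    matrix.map (fun m =>
      (m.map (fun r => r.getD 1 0)).sum + (m.map (fun r => PySem.List.pyGetD r (-2) 0)).sum)

-- ===== PRECONDITION & SPEC =====
-- Pre_ excludes exactly the inputs on which A raises: the empty matrix (matrix[0] → IndexError) and,
-- with flag=False, submatrices lacking the full n×n window or, with flag=True, a row shorter than 2.
def Pre_num_of_difference (matrix : List (List (List Int))) (flag : Bool) : Prop :=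
  matrix ≠ [] ∧
  (if flag then
      ∀ m ∈ matrix, ∀ r ∈ m, 2 ≤ r.length
   else
      ∀ m ∈ matrix, (matrix.getD 0 []).length ≤ m.length ∧
        ∀ r ∈ m.take (matrix.getD 0 []).length, (matrix.getD 0 []).length ≤ r.length)
instance (matrix : List (List (List Int))) (flag : Bool) : Decidable (Pre_num_of_difference matrix flag) := by unfold Pre_num_of_difference; infer_instance

def pvWitness_num_of_difference : List (List (List Int)) × Bool := ([[[1, 2], [3, 4]]], false)

def Spec_num_of_difference (matrix : List (List (List Int))) (flag : Bool) (out : List Int) : Prop := out = num_of_difference_alt matrix flag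
instance (matrix : List (List (List Int))) (flag : Bool) (out : List Int) : Decidable (Spec_num_of_difference matrix flag out) := by unfold Spec_num_of_difference; infer_instance

-- ===== CLAIM =====
def Claim_equal_num_of_difference : Prop := ∀ (matrix : List (List (List Int))) (flag : Bool), Dom_num_of_difference matrix flag → Pre_num_of_difference matrix flag → Spec_num_of_difference matrix flag (num_of_difference matrix flag)

-- ===== LEMMAS AND PROOFS =====

theorem pv_sum_map_sub {α : Type} (l : List α) (f g : α → Int) :
    (l.map (fun x => f x - g x)).sum = (l.map f).sum - (l.map g).sum := by
  induction l with
  | nil => simp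
  | cons a t ih => simp [ih]; ring

-- a prefix of length n read off as getD over range n
theorem pv_take_eq_range_map {α : Type} (xs : List α) (d : α) (n : Nat) (h : n ≤ xs.length) :
    xs.take n = (List.range n).map (fun r => xs.getD r d) := by
  apply List.ext_getElem
  · simp [h]
  · intro i h1 h2
    simp at h1 h2 ⊢
    have hx : i < xs.length := by omega
    simp [List.getElem?_eq_getElem hx]

-- range 0..n splits at mid (mid ≤ n) into range 0..mid and range mid..n
theorem pv_range_split (mid n : Nat) (h : mid ≤ n) :
    List.range n = List.range mid ++ pvHi mid n := by
  unfold pvHi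
  have h2 : n = mid + (n - mid) := by omega
  rw [h2, List.range_add]
  simp

-- per-row: the two slice sums of B equal the range-map sums A accumulates
theorem pv_row_eq (r : List Int) (mid n : Nat) (hmid : mid ≤ n) (h : n ≤ r.length) :
    (r.take mid).sum - ((r.drop mid).take (n - mid)).sum
    = ((List.range mid).map (fun c => r.getD c 0)).sum
      - ((pvHi mid n).map (fun c => r.getD c 0)).sum := by
  congr 1
  · rw [pv_take_eq_range_map r 0 mid (le_trans hmid h)]
  · rw [pv_take_eq_range_map (r.drop mid) 0 (n - mid) (by simp; omega)]
    unfold pvHi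
    rw [List.map_map]
    apply congrArg
    apply List.map_congr_left
    intro k hk
    simp at hk
    simp only [Function.comp]
    have hx : mid + k < r.length := by omega
    have hy : k < (r.drop mid).length := by simp; omega
    simp [List.getD_eq_getElem?_getD, List.getElem?_eq_getElem hx, List.getElem?_eq_getElem hy]

-- per-submatrix equality in the flag = false branch
theorem pv_entry_eq (m : List (List Int)) (mid n : Nat) (hmid : mid ≤ n)
    (h1 : n ≤ m.length) (h2 : ∀ r ∈ m.take n, n ≤ r.length) :
    |(PySem.List.slice m (some 0) (some (n : Int))).foldl
        (fun d row => d + ((PySem.List.slice row (some 0) (some (mid : Int))).sum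
                           - (PySem.List.slice row (some (mid : Int)) (some (n : Int))).sum)) 0|
    = (let qrtr1 := (List.range mid).foldl (fun a r => (List.range mid).foldl (fun a c => a + pvCell m r c) a) 0
       let qrtr2 := (List.range mid).foldl (fun a r => (pvHi mid n).foldl (fun a c => a + pvCell m r c) a) 0
       let qrtr3 := (pvHi mid n).foldl (fun a r => (List.range mid).foldl (fun a c => a + pvCell m r c) a) 0
       let qrtr2' := (pvHi mid n).foldl (fun a r => (pvHi mid n).foldl (fun a c => a + pvCell m r c) a) qrtr2
       let qrtr4 : Int := 0
       |(qrtr1 + qrtr3) - (qrtr2' + qrtr4)|) := by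
  simp only [PySem.List.slice_zero_start, PySem.List.slice_to_natCast, PySem.List.slice_natCast]
  rw [PySem.List.foldl_add]
  have hmap : (m.take n).map
      (fun row => (row.take mid).sum - ((row.drop mid).take (n - mid)).sum)
      = (List.range n).map (fun r =>
          ((List.range mid).map (fun c => pvCell m r c)).sum
          - ((pvHi mid n).map (fun c => pvCell m r c)).sum) := by
    rw [pv_take_eq_range_map m [] n h1, List.map_map]
    apply List.map_congr_left
    intro r hr
    simp at hr
    simp only [Function.comp]
    have hmem : m.getD r [] ∈ m.take n := by
      rw [pv_take_eq_range_map m [] n h1]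
      exact List.mem_map.2 ⟨r, by simp [hr], rfl⟩
    exact pv_row_eq (m.getD r []) mid n hmid (h2 _ hmem)
  rw [hmap]
  simp only [pv_sum_map_sub, pv_range_split mid n hmid, List.map_append, List.sum_append,
    PySem.List.foldl_add]
  ring_nf

-- ===== VERDICT =====
theorem num_of_difference_spec : Claim_equal_num_of_difference := by
  intro matrix flag _hdom hpre
  unfold Spec_num_of_difference num_of_difference num_of_difference_alt
  obtain ⟨hne, hsh⟩ := hpre
  cases flag with
  | false =>
      simp only [if_true]
      apply Eq.symm
      apply List.map_congr_left
      intro m hm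
      simp only [Bool.false_eq_true, if_false] at hsh
      obtain ⟨h1, h2⟩ := hsh m hm
      exact pv_entry_eq m _ _ (Nat.div_le_self _ 2) h1 h2
  | true =>
      simp only [Bool.true_eq_false, if_false]
      apply Eq.symm
      apply List.map_congr_left
      intro m _
      rw [PySem.List.foldl_add]
      simp
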